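-- pv_equiv track=rewrite | github.com/Dylandk10/practice_hash | encrypt_file.py | demodded_hash
-- ===== SOURCE A (Python) =====
-- secrete_key = 'secrete'
--
-- shift_val = 13
--
-- max_ord = 125
--
-- min_ord = 32
--
-- def demodded_hash(modded_hash):
--     unmodded_hash = ''
--     modded_original_length = len(modded_hash) - len(secrete_key)
--     modded_hash_without_salt = modded_hash[:modded_original_length]
--     for i in range(len(modded_hash_without_salt)):
--         if i % 2 == 0 and ord(modded_hash_without_salt[i]) % 2 == 0:
--             asc_two = ord(modded_hash_without_salt[i]) - 2
--             unmodded_hash += chr(asc_two)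
--         else:
--             unmodded_hash += modded_hash_without_salt[i]
--     res = dehash_function(unmodded_hash)
--     return res
--
-- def dehash_function(new_hash):
--     dehashed_string = ''
--     for letter in new_hash:
--         hold = ord(letter)
--         if hold < 45:
--             remainder = min_ord - (hold-shift_val)
--             dehashed_string += chr(max_ord - remainder)
--             #dehashed_string += chr((max_ord + min_ord) - (hold+shift_val))
--         else:
--             dehashed_string += chr(hold - shift_val)
--     return dehashed_string
-- ===== SOURCE B (Python) =====
-- secrete_key = 'secrete'
--
-- shift_val = 13
--
-- max_ord = 125
--
-- min_ord = 32
--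
-- def demodded_hash(modded_hash):
--     # Single fused pass: un-mod and de-shift each character at once,
--     # never building the intermediate unmodded string.
--     core = modded_hash[:len(modded_hash) - len(secrete_key)]
--     out = []
--     for i, ch in enumerate(core):
--         h = ord(ch)
--         if i % 2 == 0 and h % 2 == 0:
--             h -= 2
--         if h < 45:
--             # max_ord - (min_ord - (h - shift_val)) simplified: 125-32-13 = 80
--             out.append(chr(h + 80))
--         else:
--             out.append(chr(h - shift_val))
--     return ''.join(out)
-- ===== Notes on version B (the rewrite author's own statement) =====
-- stated objective: simpler
-- what changed: B fuses A's two sequential passes (index-parity un-mod pass building an intermediate string, then a separate de-shift pass) into one loop over the salt-stripped string, appending the final character directly with the <45 branch simplified to the closed form chr(h+80); no intermediate string is built.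
import Mathlib
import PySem

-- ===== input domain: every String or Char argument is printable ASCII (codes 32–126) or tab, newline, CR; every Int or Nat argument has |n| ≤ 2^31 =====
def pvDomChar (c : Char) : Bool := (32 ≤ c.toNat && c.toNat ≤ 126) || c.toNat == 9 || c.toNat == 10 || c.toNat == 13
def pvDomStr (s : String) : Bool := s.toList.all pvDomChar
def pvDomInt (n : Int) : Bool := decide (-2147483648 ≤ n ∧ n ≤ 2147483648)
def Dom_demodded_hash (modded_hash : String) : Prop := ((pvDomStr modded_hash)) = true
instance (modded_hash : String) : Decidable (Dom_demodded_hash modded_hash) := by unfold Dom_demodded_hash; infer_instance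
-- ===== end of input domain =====

-- B fuses A's two linear passes (un-mod, then de-shift) into a single loop over the
-- salt-stripped string, never building the intermediate unmodded string; objective: simpler.

-- ===== PORT A =====
-- A's `str += c` accumulation is modeled as `List Char` append with a final `String.ofList`.
-- constants: secrete_key = 'secrete' (length 7), shift_val = 13, max_ord = 125, min_ord = 32.
def dehash_function (new_hash : String) : String :=
  String.ofList (new_hash.toList.foldl (fun acc letter =>
    let hold : Int := letter.toNat
    if hold < 45 then
      let remainder : Int := 32 - (hold - 13)
      acc ++ [Char.ofNat (125 - remainder).toNat]
    else
      acc ++ [Char.ofNat (hold - 13).toNat]) [])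

def demodded_hash (modded_hash : String) : String :=
  let mh := modded_hash.toList
  let modded_original_length : Int := (mh.length : Int) - 7
  let modded_hash_without_salt := PySem.List.slice mh none (some modded_original_length)
  let unmodded_hash := (PySem.List.pyRange 0 modded_hash_without_salt.length).foldl
    (fun acc i =>
      -- i is always in range here, so the ' ' default of pyGetD is never used
      let c := PySem.List.pyGetD modded_hash_without_salt i ' '
      if PySem.Int.mod i 2 = 0 ∧ PySem.Int.mod (c.toNat : Int) 2 = 0 then
        let asc_two : Int := (c.toNat : Int) - 2
        acc ++ [Char.ofNat asc_two.toNat]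
      else
        acc ++ [c]) []
  dehash_function (String.ofList unmodded_hash)

-- ===== PORT B =====
-- Source B's `for i, ch in enumerate(core): out.append(...)` + join is the map over core.zipIdx.
def demodded_hash_alt (modded_hash : String) : String :=
  let mh := modded_hash.toList
  let core := PySem.List.slice mh none (some ((mh.length : Int) - 7))
  String.ofList (core.zipIdx.map (fun p =>
    let h0 : Int := p.1.toNat
    let h : Int := if PySem.Int.mod (p.2 : Int) 2 = 0 ∧ PySem.Int.mod h0 2 = 0 then h0 - 2 else h0
    if h < 45 then Char.ofNat (h + 80).toNat else Char.ofNat (h - 13).toNat))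

-- ===== PRECONDITION & SPEC =====
def Spec_demodded_hash (modded_hash : String) (out : String) : Prop := out = demodded_hash_alt modded_hash
instance (modded_hash : String) (out : String) : Decidable (Spec_demodded_hash modded_hash out) := by unfold Spec_demodded_hash; infer_instance

-- ===== CLAIM (what is proved, stated in full; the proofs are below) =====
def Claim_equal_demodded_hash : Prop := ∀ (modded_hash : String), Dom_demodded_hash modded_hash → Spec_demodded_hash modded_hash (demodded_hash modded_hash)

-- ===== LEMMAS AND PROOFS =====

-- the per-character function of A's first pass (un-mod)
def pvGA (i : Int) (c : Char) : Char :=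
  if PySem.Int.mod i 2 = 0 ∧ PySem.Int.mod (c.toNat : Int) 2 = 0 then
    Char.ofNat ((c.toNat : Int) - 2).toNat
  else c

-- the per-character function of A's second pass (de-shift)
def pvFA (letter : Char) : Char :=
  let hold : Int := letter.toNat
  if hold < 45 then Char.ofNat (125 - (32 - (hold - 13))).toNat
  else Char.ofNat (hold - 13).toNat

-- the per-character function of B's fused pass
def pvFB (i : Int) (c : Char) : Char :=
  let h0 : Int := c.toNat
  let h : Int := if PySem.Int.mod i 2 = 0 ∧ PySem.Int.mod h0 2 = 0 then h0 - 2 else h0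
  if h < 45 then Char.ofNat (h + 80).toNat else Char.ofNat (h - 13).toNat

-- A's index loop over pyRange with pyGetD is the map of pvGA over the indexed list
lemma pvLoopA_eq (xs : List Char) :
    ∀ (k : Nat) (acc : List Char),
      (PySem.List.pyRange (k : Int) xs.length).foldl
        (fun acc i => acc ++ [pvGA i (PySem.List.pyGetD xs i ' ')]) acc
      = acc ++ ((xs.drop k).zipIdx k).map (fun p => pvGA (p.2 : Int) p.1) := by
  intro k acc
  by_cases h : k < xs.length
  · rw [PySem.List.pyRange_one_cons (by exact_mod_cast h)]
    have hdrop : xs.drop k = xs[k] :: xs.drop (k + 1) := List.drop_eq_getElem_cons h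
    rw [hdrop, List.zipIdx_cons, List.map_cons]
    have hget : PySem.List.pyGetD xs (k : Int) ' ' = xs[k] := by
      rw [PySem.List.pyGetD_eq_getElem xs ' ' (by positivity) (by exact_mod_cast h)]
      simp
    have := pvLoopA_eq xs (k + 1) (acc ++ [pvGA (k : Int) (PySem.List.pyGetD xs (k : Int) ' ')])
    simp only [List.foldl_cons]
    rw [show ((k : Int) + 1) = ((k + 1 : Nat) : Int) by push_cast; ring, this, hget]
    simp
  · have hle : (xs.length : Int) ≤ (k : Int) := by exact_mod_cast Nat.le_of_not_lt h
    have : PySem.List.pyRange (k : Int) xs.length = [] := by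
      simp [PySem.List.pyRange]; omega
    rw [this, List.drop_eq_nil_of_le (Nat.le_of_not_lt h)]
    simp
termination_by k => xs.length - k
decreasing_by omega

-- on domain characters the fused per-character function agrees with A's composition
lemma pvPointwise (i : Int) (c : Char) (hc : pvDomChar c = true) :
    pvFA (pvGA i c) = pvFB i c := by
  have hrange : 9 ≤ c.toNat ∧ c.toNat ≤ 126 := by
    simp [pvDomChar] at hc; omega
  simp only [pvFA, pvGA, pvFB]
  by_cases htw : PySem.Int.mod i 2 = 0 ∧ PySem.Int.mod (c.toNat : Int) 2 = 0
  · rw [if_pos htw, if_pos htw]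
    have hvalid : (((c.toNat : Int) - 2).toNat).isValidChar := by
      constructor; omega
    have ht : (Char.ofNat (((c.toNat : Int) - 2).toNat)).toNat = ((c.toNat : Int) - 2).toNat := by
      rw [Char.toNat_ofNat, if_pos hvalid]
    rw [ht]
    have hcast : ((((c.toNat : Int) - 2).toNat : Int)) = (c.toNat : Int) - 2 := by omega
    rw [hcast]
    split_ifs with h1
    · congr 1; omega
    · rfl
  · rw [if_neg htw, if_neg htw]
    split_ifs with h1
    · congr 1; omega
    · rfl

-- slicing only drops elements
lemma pvMem_slice {c : Char} {xs : List Char} {a b : Option Int}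
    (h : c ∈ PySem.List.slice xs a b) : c ∈ xs := by
  unfold PySem.List.slice at h
  split at h <;>
  first
  | exact List.mem_of_mem_take (List.mem_of_mem_drop h)
  | exact List.mem_of_mem_drop (List.mem_of_mem_take h)

-- ===== VERDICT (by name: the statement is the Claim_ definition above) =====
theorem demodded_hash_spec : Claim_equal_demodded_hash := by
  intro s hdom
  unfold Spec_demodded_hash demodded_hash demodded_hash_alt dehash_function
  simp only []
  set core := PySem.List.slice s.toList none (some ((s.toList.length : Int) - 7)) with hcore
  have hloop := pvLoopA_eq core 0 []
  simp only [Nat.cast_zero, List.drop_zero, List.nil_append] at hloop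
  show String.ofList (((String.ofList _).toList).foldl _ []) = _
  rw [String.toList_ofList]
  -- rewrite A's inner loop body into pvGA form and the dehash fold into a map of pvFA
  have hbody : (fun (acc : List Char) (i : Int) =>
      let c := PySem.List.pyGetD core i ' '
      if PySem.Int.mod i 2 = 0 ∧ PySem.Int.mod (c.toNat : Int) 2 = 0 then
        let asc_two : Int := (c.toNat : Int) - 2
        acc ++ [Char.ofNat asc_two.toNat]
      else acc ++ [c]) =
      (fun acc i => acc ++ [pvGA i (PySem.List.pyGetD core i ' ')]) := by
    funext acc i; simp only [pvGA]; split_ifs <;> rfl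
  rw [hbody, hloop]
  have hdehash : ∀ (l : List Char),
      l.foldl (fun acc letter =>
        let hold : Int := letter.toNat
        if hold < 45 then
          let remainder : Int := 32 - (hold - 13)
          acc ++ [Char.ofNat (125 - remainder).toNat]
        else acc ++ [Char.ofNat (hold - 13).toNat]) ([] : List Char) = l.map pvFA := by
    intro l
    have : (fun (acc : List Char) (letter : Char) =>
        let hold : Int := letter.toNat
        if hold < 45 then
          let remainder : Int := 32 - (hold - 13)
          acc ++ [Char.ofNat (125 - remainder).toNat]
        else acc ++ [Char.ofNat (hold - 13).toNat]) =
        (fun acc letter => acc ++ [pvFA letter]) := by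
      funext acc letter; simp only [pvFA]; split_ifs <;> rfl
    rw [this, PySem.List.foldl_append_singleton_eq_map]; simp
  rw [hdehash, List.map_map]
  congr 1
  apply List.map_congr_left
  intro p hp
  have hmem : p.1 ∈ core := by
    obtain ⟨x, i⟩ := p
    exact (List.mem_zipIdx hp).2.2 ▸ List.getElem_mem _
  have hc : pvDomChar p.1 = true := by
    have : p.1 ∈ s.toList := pvMem_slice hmem
    have := (List.all_eq_true.mp hdom) _ this
    exact this
  simp only [Function.comp]
  exact pvPointwise (p.2 : Int) p.1 hc
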